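-- pv_equiv track=rewrite | github.com/xwh-01/ComputerNetHomework | version history/new_vlc_project/src/decoder_pillow.py | _order_candidate_quad
-- ===== SOURCE A (Python) =====
-- def _order_candidate_quad(points):
--     tl = min(points, key=lambda point: point[0] + point[1])
--     tr = min(points, key=lambda point: -point[0] + point[1])
--     bl = min(points, key=lambda point: point[0] - point[1])
--     br = max(points, key=lambda point: point[0] + point[1])
--
--     unique = {(point[0], point[1]) for point in (tl, tr, bl, br)}
--     if len(unique) < 4:
--         return None
--     return (tl, tr, bl, br)
-- ===== SOURCE B (Python) =====
-- def _quad_rec(pts):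
--     if len(pts) <= 1:
--         p = pts[0]
--         return (p, p, p, p)
--     mid = len(pts) // 2
--     ltl, ltr, lbl, lbr = _quad_rec(pts[:mid])
--     rtl, rtr, rbl, rbr = _quad_rec(pts[mid:])
--     tl = ltl if ltl[0] + ltl[1] <= rtl[0] + rtl[1] else rtl
--     tr = ltr if -ltr[0] + ltr[1] <= -rtr[0] + rtr[1] else rtr
--     bl = lbl if lbl[0] - lbl[1] <= rbl[0] - rbl[1] else rbl
--     br = lbr if lbr[0] + lbr[1] >= rbr[0] + rbr[1] else rbr
--     return (tl, tr, bl, br)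
--
--
-- def _order_candidate_quad(points):
--     tl, tr, bl, br = _quad_rec(points)
--     unique = {(p[0], p[1]) for p in (tl, tr, bl, br)}
--     if len(unique) < 4:
--         return None
--     return (tl, tr, bl, br)
-- ===== Notes on version B (the rewrite author's own statement) =====
-- stated objective: alternative
-- what changed: B replaces A's four linear min/max scans by a divide-and-conquer recursion that splits the list in halves, computes each half's corner quad, and merges the two quads with left-biased comparisons (preserving first-occurrence tie-breaking).
import Mathlib
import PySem

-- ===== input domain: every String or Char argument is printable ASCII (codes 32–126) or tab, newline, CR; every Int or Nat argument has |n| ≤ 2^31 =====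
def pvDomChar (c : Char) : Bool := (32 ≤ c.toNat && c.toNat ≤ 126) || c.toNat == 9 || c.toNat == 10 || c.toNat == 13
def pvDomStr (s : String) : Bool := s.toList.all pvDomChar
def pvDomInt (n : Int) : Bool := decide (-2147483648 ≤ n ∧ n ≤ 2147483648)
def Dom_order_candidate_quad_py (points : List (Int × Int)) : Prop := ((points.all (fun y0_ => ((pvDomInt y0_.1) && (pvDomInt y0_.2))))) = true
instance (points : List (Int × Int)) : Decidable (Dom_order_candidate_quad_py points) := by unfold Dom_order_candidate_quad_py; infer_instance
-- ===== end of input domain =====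

-- B: divide-and-conquer — split the list in halves, compute each half's corner quad
-- recursively, merge the two quads with left-biased comparisons — instead of A's four
-- linear min/max scans. Same return value wherever A returns (nonempty input).

-- ===== PORT A =====
def order_candidate_quad_py (points : List (Int × Int)) : Option ((Int × Int) × (Int × Int) × (Int × Int) × (Int × Int)) :=
  match PySem.List.min? points (fun p => p.1 + p.2),
        PySem.List.min? points (fun p => -p.1 + p.2),
        PySem.List.min? points (fun p => p.1 - p.2),
        PySem.List.max? points (fun p => p.1 + p.2) with
  | some tl, some tr, some bl, some br =>
      let unique : PySem.Set (Int × Int) := PySem.Set.ofList [tl, tr, bl, br]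
      if PySem.Set.len unique < 4 then none else some (tl, tr, bl, br)
  | _, _, _, _ => none   -- min/max of an empty list: Python raises ValueError (outside Pre_)

-- ===== PORT B =====
-- _quad_rec: none = IndexError on pts[0] for the empty list (outside Pre_)
def quadRecB (pts : List (Int × Int)) : Option ((Int × Int) × (Int × Int) × (Int × Int) × (Int × Int)) :=
  match pts with
  | [] => none
  | [p] => some (p, p, p, p)
  | p1 :: p2 :: rest =>
    let pts' := p1 :: p2 :: rest
    let mid := pts'.length / 2
    match quadRecB (pts'.take mid) with
    | none => none
    | some (ltl, ltr, lbl, lbr) =>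
      match quadRecB (pts'.drop mid) with
      | none => none
      | some (rtl, rtr, rbl, rbr) =>
        some ((if ltl.1 + ltl.2 ≤ rtl.1 + rtl.2 then ltl else rtl),
              (if -ltr.1 + ltr.2 ≤ -rtr.1 + rtr.2 then ltr else rtr),
              (if lbl.1 - lbl.2 ≤ rbl.1 - rbl.2 then lbl else rbl),
              (if lbr.1 + lbr.2 ≥ rbr.1 + rbr.2 then lbr else rbr))
termination_by pts.length
decreasing_by
  · simp only [List.length_take, List.length_cons]
    omega
  · simp only [List.length_drop, List.length_cons]
    omega

def order_candidate_quad_py_alt (points : List (Int × Int)) : Option ((Int × Int) × (Int × Int) × (Int × Int) × (Int × Int)) :=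
  match quadRecB points with
  | none => none
  | some (tl, tr, bl, br) =>
      let unique : PySem.Set (Int × Int) := PySem.Set.ofList [tl, tr, bl, br]
      if PySem.Set.len unique < 4 then none else some (tl, tr, bl, br)

-- ===== PRECONDITION & SPEC =====
-- A raises ValueError (min of empty sequence) on the empty list; B raises IndexError there.
def Pre_order_candidate_quad_py (points : List (Int × Int)) : Prop := points ≠ []
instance (points : List (Int × Int)) : Decidable (Pre_order_candidate_quad_py points) := by unfold Pre_order_candidate_quad_py; infer_instance
def pvWitness_order_candidate_quad_py : (List (Int × Int)) := [(0, 0), (4, 0), (0, 4), (4, 4)]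

def Spec_order_candidate_quad_py (points : List (Int × Int)) (out : Option ((Int × Int) × (Int × Int) × (Int × Int) × (Int × Int))) : Prop := out = order_candidate_quad_py_alt points
instance (points : List (Int × Int)) (out : Option ((Int × Int) × (Int × Int) × (Int × Int) × (Int × Int))) : Decidable (Spec_order_candidate_quad_py points out) := by unfold Spec_order_candidate_quad_py; infer_instance

-- ===== CLAIM (what is proved, stated in full; the proofs are below) =====
def Claim_equal_order_candidate_quad_py : Prop := ∀ (points : List (Int × Int)), Dom_order_candidate_quad_py points → Pre_order_candidate_quad_py points → Spec_order_candidate_quad_py points (order_candidate_quad_py points)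

-- ===== LEMMAS AND PROOFS =====

-- the first-wins running minimum with a key, as a fold
def winMin (key : (Int × Int) → Int) (h : Int × Int) (t : List (Int × Int)) : Int × Int :=
  t.foldl (fun b x => if key x < key b then x else b) h

def winMax (key : (Int × Int) → Int) (h : Int × Int) (t : List (Int × Int)) : Int × Int :=
  t.foldl (fun b x => if key b < key x then x else b) h

-- min/max with a key, seeded from the first element, is the running-winner fold
theorem min?_cons (key : (Int × Int) → Int) :
    ∀ (xs : List (Int × Int)) (m : Int × Int),
    PySem.List.min? (m :: xs) key = some (winMin key m xs) := by
  intro xs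
  induction xs with
  | nil => intro m; rfl
  | cons x t ih =>
    intro m
    have h1 : PySem.List.min? (m :: x :: t) key
        = PySem.List.min? ((if key x < key m then x else m) :: t) key := by
      simp only [PySem.List.min?, List.foldl]
      split_ifs <;> rfl
    rw [h1, ih]
    simp only [winMin, List.foldl_cons]

theorem max?_cons (key : (Int × Int) → Int) :
    ∀ (xs : List (Int × Int)) (m : Int × Int),
    PySem.List.max? (m :: xs) key = some (winMax key m xs) := by
  intro xs
  induction xs with
  | nil => intro m; rfl
  | cons x t ih =>
    intro m
    have h1 : PySem.List.max? (m :: x :: t) key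
        = PySem.List.max? ((if key m < key x then x else m) :: t) key := by
      simp only [PySem.List.max?, List.foldl]
      split_ifs <;> rfl
    rw [h1, ih]
    simp only [winMax, List.foldl_cons]

-- a left fold by an associative operation pulls the seed out
theorem foldl_op_assoc {α : Type} (f : α → α → α)
    (hf : ∀ a b c, f (f a b) c = f a (f b c)) :
    ∀ (l : List α) (a b : α), l.foldl f (f a b) = f a (l.foldl f b) := by
  intro l
  induction l with
  | nil => intro a b; rfl
  | cons x t ih => intro a b; simpa [List.foldl, hf] using ih a (f b x)

-- merging the winners of two halves gives the winner of the concatenation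
theorem winMin_append (key : (Int × Int) → Int) (h h2 : Int × Int) (l1 t2 : List (Int × Int)) :
    winMin key h (l1 ++ h2 :: t2)
      = (if key (winMin key h2 t2) < key (winMin key h l1) then winMin key h2 t2 else winMin key h l1) := by
  have hassoc : ∀ a b c : Int × Int,
      (fun b x => if key x < key b then x else b) ((fun b x => if key x < key b then x else b) a b) c
        = (fun b x => if key x < key b then x else b) a ((fun b x => if key x < key b then x else b) b c) := by
    intro a b c
    simp only
    split_ifs <;> first | rfl | omega
  calc winMin key h (l1 ++ h2 :: t2)
      = t2.foldl (fun b x => if key x < key b then x else b)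
          ((fun b x => if key x < key b then x else b) (winMin key h l1) h2) := by
        simp [winMin, List.foldl_append, List.foldl]
    _ = _ := by
        rw [foldl_op_assoc _ hassoc]
        rfl

theorem winMax_append (key : (Int × Int) → Int) (h h2 : Int × Int) (l1 t2 : List (Int × Int)) :
    winMax key h (l1 ++ h2 :: t2)
      = (if key (winMax key h l1) < key (winMax key h2 t2) then winMax key h2 t2 else winMax key h l1) := by
  have hassoc : ∀ a b c : Int × Int,
      (fun b x => if key b < key x then x else b) ((fun b x => if key b < key x then x else b) a b) c
        = (fun b x => if key b < key x then x else b) a ((fun b x => if key b < key x then x else b) b c) := by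
    intro a b c
    simp only
    split_ifs <;> first | rfl | omega
  calc winMax key h (l1 ++ h2 :: t2)
      = t2.foldl (fun b x => if key b < key x then x else b)
          ((fun b x => if key b < key x then x else b) (winMax key h l1) h2) := by
        simp [winMax, List.foldl_append, List.foldl]
    _ = _ := by
        rw [foldl_op_assoc _ hassoc]
        rfl

-- the divide-and-conquer recursion computes exactly the four first-wins winners
theorem quadRecB_eq : ∀ (n : Nat) (h : Int × Int) (t : List (Int × Int)), (h :: t).length ≤ n →
    quadRecB (h :: t) = some (winMin (fun p => p.1 + p.2) h t,
                              winMin (fun p => -p.1 + p.2) h t,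
                              winMin (fun p => p.1 - p.2) h t,
                              winMax (fun p => p.1 + p.2) h t) := by
  intro n
  induction n with
  | zero => intro h t hlen; simp at hlen
  | succ n ih =>
    intro h t hlen
    match t with
    | [] => simp [quadRecB, winMin, winMax]
    | p2 :: rest =>
      rw [quadRecB]
      set pts' := h :: p2 :: rest with hpts
      set mid := pts'.length / 2 with hmiddef
      have hlenpts : pts'.length = rest.length + 2 := by simp [hpts]
      have hmidval : mid = (rest.length + 2) / 2 := by rw [hmiddef, hlenpts]
      obtain ⟨k, hk⟩ : ∃ k, mid = k + 1 := ⟨mid - 1, by omega⟩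
      set l1 := (p2 :: rest).take k with hl1
      have htake : pts'.take mid = h :: l1 := by
        rw [hk, hpts, hl1]
        simp
      have hdroplen : 0 < (pts'.drop mid).length := by
        simp only [List.length_drop]
        omega
      obtain ⟨h2, t2, hdrop⟩ : ∃ h2 t2, pts'.drop mid = h2 :: t2 := by
        match hd : pts'.drop mid with
        | [] => rw [hd] at hdroplen; simp at hdroplen
        | a :: b => exact ⟨a, b, rfl⟩
      have hsplit : p2 :: rest = l1 ++ h2 :: t2 := by
        have := List.take_append_drop mid pts'
        rw [htake, hdrop, hpts] at this
        exact (List.cons_inj_right h).mp (by simpa using this.symm)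
      have hl1len : l1.length ≤ k := by rw [hl1]; simp
      have hlen1 : (h :: l1).length ≤ n := by
        simp only [List.length_cons]
        omega
      have hlen2 : (h2 :: t2).length ≤ n := by
        have hdl : (pts'.drop mid).length = pts'.length - mid := by simp
        rw [hdrop] at hdl
        simp only [List.length_cons] at hdl ⊢
        omega
      rw [htake, hdrop, ih h l1 hlen1, ih h2 t2 hlen2]
      dsimp only
      conv_rhs => rw [hsplit]
      rw [winMin_append, winMin_append, winMin_append, winMax_append]
      have flip : ∀ (a b : Int × Int) (key : (Int × Int) → Int),
          (if key a ≤ key b then a else b) = (if key b < key a then b else a) := by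
        intro a b key
        split_ifs <;> first | rfl | omega
      congr 1
      refine Prod.ext ?_ (Prod.ext ?_ (Prod.ext ?_ ?_))
      · exact flip _ _ (fun p => p.1 + p.2)
      · exact flip _ _ (fun p => -p.1 + p.2)
      · exact flip _ _ (fun p => p.1 - p.2)
      · simp only [ge_iff_le]
        split_ifs <;> first | rfl | omega

theorem order_candidate_quad_py_spec_aux (p0 : Int × Int) (rest : List (Int × Int)) :
    order_candidate_quad_py (p0 :: rest) = order_candidate_quad_py_alt (p0 :: rest) := by
  simp only [order_candidate_quad_py, order_candidate_quad_py_alt,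
    min?_cons (fun p : Int × Int => p.1 + p.2),
    min?_cons (fun p : Int × Int => -p.1 + p.2),
    min?_cons (fun p : Int × Int => p.1 - p.2),
    max?_cons (fun p : Int × Int => p.1 + p.2),
    quadRecB_eq (p0 :: rest).length p0 rest (le_refl _)]

-- ===== VERDICT (by name: the statement is the Claim_ definition above) =====
theorem order_candidate_quad_py_spec : Claim_equal_order_candidate_quad_py := by
  intro points _ hpre
  unfold Spec_order_candidate_quad_py
  match points with
  | [] => exact absurd rfl hpre
  | p0 :: rest => exact order_candidate_quad_py_spec_aux p0 rest
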